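-- pv_equiv track=rewrite | github.com/s8foschm/aoc | 2023/day2/day2.py | find_maximums
-- ===== SOURCE A (Python) =====
-- def find_maximums(game):
--     red_max, green_max, blue_max = 0, 0, 0
--     for draw in game:
--         if "red" in draw:
--             red = draw["red"]
--             if red > red_max:
--                 red_max = red
--         if "green" in draw:
--             green = draw["green"]
--             if green > green_max:
--                 green_max = green
--         if "blue" in draw:
--             blue = draw["blue"]
--             if blue > blue_max:
--                 blue_max = blue
--     return red_max, green_max, blue_max
-- ===== SOURCE B (Python) =====
-- def find_maximums(game):
--     def color_max(c):
--         return max([draw[c] for draw in game if c in draw] + [0])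
--     return color_max("red"), color_max("green"), color_max("blue")
-- ===== Notes on version B (the rewrite author's own statement) =====
-- stated objective: simpler
-- what changed: Replaces the single interleaved three-branch loop over draws with three independent per-color passes, each taking the max of that color's values (clamped at 0).
import Mathlib
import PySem

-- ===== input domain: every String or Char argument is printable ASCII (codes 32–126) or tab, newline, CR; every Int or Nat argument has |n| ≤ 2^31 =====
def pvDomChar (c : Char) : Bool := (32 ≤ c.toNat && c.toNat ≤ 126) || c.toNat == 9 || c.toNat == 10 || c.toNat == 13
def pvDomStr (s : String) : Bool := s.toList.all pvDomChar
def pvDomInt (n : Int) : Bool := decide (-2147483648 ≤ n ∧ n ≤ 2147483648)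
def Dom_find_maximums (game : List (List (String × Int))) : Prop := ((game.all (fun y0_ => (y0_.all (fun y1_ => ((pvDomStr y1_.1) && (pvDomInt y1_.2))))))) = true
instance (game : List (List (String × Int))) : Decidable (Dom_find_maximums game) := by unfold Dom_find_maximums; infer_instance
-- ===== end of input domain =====

-- B computes each colour's maximum in its own pass (max of the present values, clamped at 0) instead of A's single interleaved three-branch loop; objective: simpler.

-- ===== PORT A =====
-- one fold over the draws carrying (red_max, green_max, blue_max), three sequential membership branches per draw, as in A
def find_maximums (game : List (List (String × Int))) : Int × Int × Int :=
  game.foldl (fun st draw =>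
    let red_max :=
      match draw.lookup "red" with          -- if "red" in draw: red = draw["red"]
      | some red => if red > st.1 then red else st.1
      | none => st.1
    let green_max :=
      match draw.lookup "green" with
      | some green => if green > st.2.1 then green else st.2.1
      | none => st.2.1
    let blue_max :=
      match draw.lookup "blue" with
      | some blue => if blue > st.2.2 then blue else st.2.2
      | none => st.2.2
    (red_max, green_max, blue_max)) (0, 0, 0)

-- ===== PORT B =====
-- max([draw[c] for draw in game if c in draw] + [0])
def pvColorMax (game : List (List (String × Int))) (c : String) : Int :=
  (PySem.List.max?
    (((game.filter (fun draw => (draw.lookup c).isSome)).map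
        (fun draw => (draw.lookup c).getD 0)) ++ [0])
    (fun x => x)).getD 0

def find_maximums_alt (game : List (List (String × Int))) : Int × Int × Int :=
  (pvColorMax game "red", pvColorMax game "green", pvColorMax game "blue")

-- ===== PRECONDITION & SPEC =====
def Spec_find_maximums (game : List (List (String × Int))) (out : Int × Int × Int) : Prop := out = find_maximums_alt game
instance (game : List (List (String × Int))) (out : Int × Int × Int) : Decidable (Spec_find_maximums game out) := by unfold Spec_find_maximums; infer_instance

-- ===== CLAIM (what is proved, stated in full; the proofs are below) =====
def Claim_equal_find_maximums : Prop := ∀ (game : List (List (String × Int))), Dom_find_maximums game → Spec_find_maximums game (find_maximums game)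

-- ===== LEMMAS AND PROOFS =====

-- values of colour c present in the game, in order
def pvVals (game : List (List (String × Int))) (c : String) : List Int :=
  (game.filter (fun draw => (draw.lookup c).isSome)).map (fun draw => (draw.lookup c).getD 0)

theorem pvVals_cons (d : List (String × Int)) (t : List (List (String × Int))) (c : String) :
    pvVals (d :: t) c = (match d.lookup c with | some v => [v] | none => []) ++ pvVals t c := by
  unfold pvVals
  rcases h : d.lookup c with _ | v <;> simp [h]

theorem foldl_max_init (l : List Int) (a b : Int) :
    l.foldl max (max a b) = max (l.foldl max a) b := by
  induction l generalizing a with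
  | nil => rfl
  | cons x t ih =>
    simp only [List.foldl_cons]
    rw [max_right_comm, ih]

-- A's loop, from any starting triple, computes the per-colour running maxima
theorem loopA_eq (game : List (List (String × Int))) (r g b : Int) :
    game.foldl (fun st draw =>
      let red_max :=
        match draw.lookup "red" with
        | some red => if red > st.1 then red else st.1
        | none => st.1
      let green_max :=
        match draw.lookup "green" with
        | some green => if green > st.2.1 then green else st.2.1
        | none => st.2.1
      let blue_max :=
        match draw.lookup "blue" with
        | some blue => if blue > st.2.2 then blue else st.2.2
        | none => st.2.2
      (red_max, green_max, blue_max)) (r, g, b)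
    = ((pvVals game "red").foldl max r, (pvVals game "green").foldl max g,
       (pvVals game "blue").foldl max b) := by
  induction game generalizing r g b with
  | nil => simp [pvVals]
  | cons d t ih =>
    simp only [List.foldl_cons]
    rw [ih]
    rw [pvVals_cons d t "red", pvVals_cons d t "green", pvVals_cons d t "blue"]
    rcases hr : d.lookup "red" with _ | vr <;>
      rcases hg : d.lookup "green" with _ | vg <;>
      rcases hb : d.lookup "blue" with _ | vb <;>
      simp only [List.nil_append, List.cons_append, List.foldl_cons] <;>
      congr 1 <;> try congr 1
    all_goals (split_ifs with h <;> congr 1 <;> omega)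

-- B's per-colour pass equals the running-max fold starting at 0
theorem pvColorMax_eq (game : List (List (String × Int))) (c : String) :
    pvColorMax game c = (pvVals game c).foldl max 0 := by
  unfold pvColorMax
  show (PySem.List.max? (pvVals game c ++ [0]) (fun x => x)).getD 0 = _
  rcases h : pvVals game c with _ | ⟨x, t⟩
  · simp [PySem.List.max?_id_cons]
  · simp only [List.cons_append]
    rw [PySem.List.max?_id_cons]
    simp only [Option.getD_some, List.foldl_append, List.foldl_cons, List.foldl_nil,
      List.foldl_cons]
    rw [← foldl_max_init t x 0, max_comm x 0]

-- ===== VERDICT (by name: the statement is the Claim_ definition above) =====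
theorem find_maximums_spec : Claim_equal_find_maximums := by
  intro game _
  unfold Spec_find_maximums find_maximums find_maximums_alt
  rw [loopA_eq game 0 0 0, pvColorMax_eq, pvColorMax_eq, pvColorMax_eq]
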